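-- pv_equiv track=rewrite | github.com/aswyatt/foobar | Challenge 4/4_1_FreeBunnies.py | solution
-- ===== SOURCE A (Python) =====
-- def solution(num_bun, num_required):
--     #   Return trivial cases
--     if num_required<1:
--         #   No bunnies required!
--         return ([[] for nb in range(num_bun)], [])
--     if num_required==1:
--         #   All bunnies have the same key (0)
--         return ([[0] for nb in range(num_bun)], [[nb for nb in range(num_bun)]])
--     if num_required==num_bun:
--         #   All bunnies have a unique key (0:num_bun-1)
--         return ([[nb] for nb in range(num_bun)], [[nb] for nb in range(num_bun)])
--
--     #   Since any num_required-1 bunnies is insufficient, the remaining bunnies must have the same additional key, hence we need to find the number of combinations for num_bun with num_bun-(num_required-1)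
--     combos = GetCombos(num_bun, num_bun-num_required+1)
--
--     #   Given all the combinations, find the key distribution for num_bun
--     keys = GetKeys(combos, num_bun)
--     return (keys, combos)
--
-- def GetKeys(combos, Nb):
--     #   Initialise keys list
--     keys = [[] for b in range(Nb)]
--     #   First key = 0
--     key = 0
--     #   Loop through all combinations
--     for combo in combos:
--         #   Give current key to bunnies listed in current combo
--         for bunny in combo:
--             keys[bunny].append(key)
--         #   Increment key
--         key += 1
--     return keys
--
-- def GetCombos(Nb, Nr):
--     #   Need to find combination of bunnies without a key:
--     #   e.g. for (6, 4)
--     #   bunny ----------->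
--     #            0 1 2 3 4 5
--     #   combo  0 x x x x
--     #      |   1 x x x   x
--     #      |   2 x x x     x
--     #      |   3 x x   x x
--     #      V   4 x x   x   x
--     #   etc.
--     bunnies = [nb for nb in range(Nr)]
--     combos = []
--     while True:
--         # for nb in range(Nr):
--         #     keys[bunnies[nb]].append(key)
--         combos.append([b for b in bunnies])
--         # key += 1
--         nb = Nr-1
--         while bunnies[nb]==Nb-(Nr-nb):
--             nb -= 1
--         if nb<0:
--             break
--         bunnies[nb] += 1
--         if nb<Nr-1:
--             for n in range(nb+1, Nr):
--                 bunnies[n] = bunnies[n-1]+1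
--     return combos
-- ===== SOURCE B (Python) =====
-- import itertools
--
-- def solution(num_bun, num_required):
--     # No key needed: every bunny gets an empty key list and no group can open.
--     if num_required < 1:
--         return ([[] for _ in range(num_bun)], [])
--     # Each key is shared by a group of num_bun - num_required + 1 bunnies:
--     # leaving out any num_required - 1 bunnies must still cover every key.
--     group = num_bun - num_required + 1
--     combos = [list(c) for c in itertools.combinations(range(num_bun), group)]
--     keys = [[i for i, c in enumerate(combos) if b in c] for b in range(num_bun)]
--     return (keys, combos)
-- ===== Notes on version B (the rewrite author's own statement) =====
-- stated objective: idiomatic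
-- what changed: B replaces the hand-rolled next-combination index odometer (while-loop with negative-index wraparound) and the num_required==1 / num_required==num_bun special cases by a single direct combinations generation, and builds keys by a per-bunny gather comprehension over enumerate(combos) instead of A's mutating scatter loop.
-- outside the precondition, e.g. on solution(-1, 1): A returns ([], [[]]), B raises ValueError
import Mathlib
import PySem

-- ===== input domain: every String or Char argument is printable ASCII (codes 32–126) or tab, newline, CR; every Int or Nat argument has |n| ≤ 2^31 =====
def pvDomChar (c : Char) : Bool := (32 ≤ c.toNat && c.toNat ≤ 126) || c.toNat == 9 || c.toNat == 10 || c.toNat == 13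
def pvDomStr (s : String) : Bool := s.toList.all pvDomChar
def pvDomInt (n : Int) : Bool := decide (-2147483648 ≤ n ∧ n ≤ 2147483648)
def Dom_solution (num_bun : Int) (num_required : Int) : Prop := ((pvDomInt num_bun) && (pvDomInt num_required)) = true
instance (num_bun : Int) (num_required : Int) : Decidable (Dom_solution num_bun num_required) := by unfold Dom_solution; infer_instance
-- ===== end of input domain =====

-- B replaces A's hand-rolled next-combination odometer and its two special cases by a direct
-- lexicographic combinations generation, and gathers keys per bunny instead of scattering.

-- ===== PORT A =====

-- inner `while bunnies[nb]==Nb-(Nr-nb): nb -= 1`; fuel-counted, indexing with Python wraparound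
def scanA (bunnies : List Int) (Nb Nr : Int) : Int → Nat → Int
  | nb, 0 => nb
  | nb, f+1 =>
    if PySem.List.pyGetD bunnies nb 0 = Nb - (Nr - nb) then scanA bunnies Nb Nr (nb-1) f else nb

-- one iteration of the `while True` body after the append: scan, break test, increment, reset
def bodyA (Nb Nr : Int) (bunnies : List Int) : Option (List Int) :=
  let nb := scanA bunnies Nb Nr (Nr - 1) (Nr.toNat + 2)
  if nb < 0 then none
  else
    let bunnies := PySem.List.pySetD bunnies nb (PySem.List.pyGetD bunnies nb 0 + 1)
    some (if nb < Nr - 1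
      then (PySem.List.pyRange (nb+1) Nr 1).foldl
             (fun bs n => PySem.List.pySetD bs n (PySem.List.pyGetD bs (n-1) 0 + 1)) bunnies
      else bunnies)

-- the `while True` loop of GetCombos (fuel-counted; fuel sufficiency is proved below)
def loopA (Nb Nr : Int) : Nat → List Int → List (List Int) → List (List Int)
  | 0, _, combos => combos
  | f+1, bunnies, combos =>
    match bodyA Nb Nr bunnies with
    | none => combos ++ [bunnies]
    | some b' => loopA Nb Nr f b' (combos ++ [bunnies])

def getCombos (Nb Nr : Int) : List (List Int) :=
  loopA Nb Nr ((Nb.toNat + 1) ^ Nr.toNat + 1) (PySem.List.pyRange 0 Nr 1) []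

-- GetKeys: scatter loop, `keys[bunny].append(key)` (indexing total-form; in range under Pre_)
def getKeys (combos : List (List Int)) (Nb : Int) : List (List Int) :=
  (combos.foldl
    (fun (st : List (List Int) × Int) combo =>
      (combo.foldl
        (fun ks bunny => PySem.List.pySetD ks bunny (PySem.List.pyGetD ks bunny [] ++ [st.2])) st.1,
       st.2 + 1))
    ((PySem.List.pyRange 0 Nb 1).map (fun _ => ([] : List Int)), 0)).1

def solution (num_bun : Int) (num_required : Int) : List (List Int) × List (List Int) :=
  if num_required < 1 then
    ((PySem.List.pyRange 0 num_bun 1).map (fun _ => ([] : List Int)), [])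
  else if num_required = 1 then
    ((PySem.List.pyRange 0 num_bun 1).map (fun _ => [(0 : Int)]), [PySem.List.pyRange 0 num_bun 1])
  else if num_required = num_bun then
    ((PySem.List.pyRange 0 num_bun 1).map (fun b => [b]),
     (PySem.List.pyRange 0 num_bun 1).map (fun b => [b]))
  else
    let combos := getCombos num_bun (num_bun - num_required + 1)
    (getKeys combos num_bun, combos)

-- ===== PORT B =====

-- itertools.combinations(xs, r) in lexicographic order
def combosRec : List Int → Nat → List (List Int)
  | _, 0 => [[]]
  | [], _+1 => []
  | x :: xs, r+1 =>
    if xs.length < r then []  -- itertools yields nothing when r exceeds the pool size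
    else (combosRec xs r).map (x :: ·) ++ combosRec xs (r+1)
  termination_by xs _ => xs.length

def solution_alt (num_bun : Int) (num_required : Int) : List (List Int) × List (List Int) :=
  if num_required < 1 then
    ((PySem.List.pyRange 0 num_bun 1).map (fun _ => ([] : List Int)), [])
  else
    let g := num_bun - num_required + 1
    if g < 0 then ([], [])  -- Python B raises ValueError here (only outside Pre_solution)
    else
      let combos := combosRec (PySem.List.pyRange 0 num_bun 1) g.toNat
      let keys := (PySem.List.pyRange 0 num_bun 1).map (fun b =>
        ((PySem.List.enumerate combos 0).filter (fun ic => decide (b ∈ ic.2))).map (·.1))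
      (keys, combos)

-- ===== PRECONDITION & SPEC =====
-- Pre_ excludes (i) inputs where A raises IndexError (1 < num_required and num_required ≠ num_bun and
-- num_bun < num_required), and (ii) negative bunny counts with num_required = 1, outside the function's
-- natural domain, where A returns ([], [[]]) by accident of range() on a negative count while B's
-- combinations call rejects the negative group size (ValueError).
def Pre_solution (num_bun : Int) (num_required : Int) : Prop :=
  num_required < 1 ∨ num_required ≤ num_bun ∨ (num_required = 1 ∧ num_bun = 0)
instance (num_bun : Int) (num_required : Int) : Decidable (Pre_solution num_bun num_required) := by
  unfold Pre_solution; infer_instance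

def pvWitness_solution : Int × Int := (5, 3)

def Spec_solution (num_bun : Int) (num_required : Int) (out : List (List Int) × List (List Int)) : Prop := out = solution_alt num_bun num_required
instance (num_bun : Int) (num_required : Int) (out : List (List Int) × List (List Int)) : Decidable (Spec_solution num_bun num_required out) := by unfold Spec_solution; infer_instance

-- ===== CLAIM (what is proved, stated in full; the proofs are below) =====
def Claim_equal_solution : Prop := ∀ (num_bun : Int) (num_required : Int), Dom_solution num_bun num_required → Pre_solution num_bun num_required → Spec_solution num_bun num_required (solution num_bun num_required)

-- ===== LEMMAS AND PROOFS =====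

-- abstract layer: minimal combination, lexicographic successor, tail of the enumeration
def minC (a : Int) : Nat → List Int
  | 0 => []
  | r+1 => a :: minC (a+1) r

def succA (hi : Int) : List Int → Option (List Int)
  | [] => none
  | x :: xs =>
    match succA hi xs with
    | some xs' => some (x :: xs')
    | none => if x + xs.length + 1 < hi then some (minC (x+1) (xs.length + 1)) else none

def tailC (hi : Int) : List Int → List (List Int)
  | [] => [[]]
  | x :: xs => (tailC hi xs).map (x :: ·) ++ combosRec (PySem.List.pyRange (x+1) hi 1) (xs.length + 1)

def Valid (hi : Int) : List Int → Prop
  | [] => True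
  | x :: xs => 0 ≤ x ∧ x + xs.length + 1 ≤ hi ∧ (match xs with | [] => True | y :: _ => x < y) ∧ Valid hi xs

def gatherF : List (List Int) → Int → Int → List Int
  | [], _, _ => []
  | c :: cs, k, b => (if b ∈ c then [k] else []) ++ gatherF cs (k+1) b

-- basic combosRec facts

lemma combosRec_zero (l : List Int) : combosRec l 0 = [[]] := by
  cases l <;> simp [combosRec]

lemma combosRec_short : ∀ (l : List Int) (r : Nat), l.length < r → combosRec l r = [] := by
  intro l r h
  cases l with
  | nil =>
    cases r with
    | zero => omega
    | succ r => simp [combosRec]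
  | cons x xs =>
    cases r with
    | zero => simp at h
    | succ r =>
      simp only [combosRec]
      rw [if_pos (by simp at h; omega)]

-- the guard-free unfolding (the guard only cuts branches that are empty anyway)
lemma combosRec_cons (x : Int) (xs : List Int) (r : Nat) :
    combosRec (x :: xs) (r+1) = (combosRec xs r).map (x :: ·) ++ combosRec xs (r+1) := by
  simp only [combosRec]
  split
  · rename_i hg
    rw [combosRec_short xs r (by omega), combosRec_short xs (r+1) (by omega)]
    simp
  · rfl

lemma combosRec_full : ∀ (l : List Int), combosRec l l.length = [l] := by
  intro l
  induction l with
  | nil => simp [combosRec]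
  | cons x xs ih =>
    rw [show (x :: xs).length = xs.length + 1 from rfl, combosRec_cons, ih,
        combosRec_short xs (xs.length + 1) (by omega)]
    simp

lemma combosRec_one : ∀ (l : List Int), combosRec l 1 = l.map (fun x => [x]) := by
  intro l
  induction l with
  | nil => simp [combosRec]
  | cons x xs ih => rw [combosRec_cons, combosRec_zero, ih]; simp

lemma combosRec_len_le : ∀ (l : List Int) (r : Nat), (combosRec l r).length ≤ (l.length + 1) ^ r := by
  intro l
  induction l with
  | nil => intro r; cases r <;> simp [combosRec]
  | cons x xs ih =>
    intro r
    cases r with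
    | zero => simp [combosRec]
    | succ r =>
      rw [combosRec_cons]
      simp only [List.length_append, List.length_map, List.length_cons]
      have h1 := ih r
      have h2 := ih (r+1)
      have h3 : (xs.length + 1) ^ r ≤ (xs.length + 2) ^ r := Nat.pow_le_pow_left (by omega) r
      have h4 : (xs.length + 1) ^ (r+1) ≤ (xs.length + 2) ^ r * (xs.length + 1) := by
        rw [pow_succ]
        exact Nat.mul_le_mul_right _ h3
      calc (combosRec xs r).length + (combosRec xs (r+1)).length
          ≤ (xs.length + 1) ^ r + (xs.length + 1) ^ (r+1) := Nat.add_le_add h1 h2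
        _ ≤ (xs.length + 2) ^ r + (xs.length + 2) ^ r * (xs.length + 1) := by
            exact Nat.add_le_add h3 (le_trans h4 (Nat.mul_le_mul_left _ (by omega)))
        _ = (xs.length + 2) ^ (r+1) := by ring

lemma combosRec_sublist : ∀ (l : List Int) (r : Nat) (c : List Int), c ∈ combosRec l r → c.Sublist l := by
  intro l
  induction l with
  | nil => intro r c h; cases r <;> simp [combosRec] at h; simp [h]
  | cons x xs ih =>
    intro r c h
    cases r with
    | zero => simp [combosRec] at h; simp [h]
    | succ r =>
      rw [combosRec_cons] at h
      simp only [List.mem_append, List.mem_map] at h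
      rcases h with ⟨d, hd, rfl⟩ | h
      · exact List.Sublist.cons₂ x (ih r d hd)
      · exact List.Sublist.cons x (ih (r+1) c h)

lemma minC_length (a : Int) (r : Nat) : (minC a r).length = r := by
  induction r generalizing a with
  | zero => simp [minC]
  | succ r ih => simp [minC, ih]

lemma minC_eq_pyRange : ∀ (r : Nat) (a : Int), minC a r = PySem.List.pyRange a (a + r) 1 := by
  intro r
  induction r with
  | zero => intro a; simp [minC, PySem.List.pyRange_one_eq_nil]
  | succ r ih =>
    intro a
    rw [PySem.List.pyRange_one_cons (by omega)]
    simp [minC, ih (a+1)]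
    congr 1
    omega

lemma minC_snoc : ∀ (r : Nat) (a : Int), minC a (r+1) = minC a r ++ [a + r] := by
  intro r
  induction r with
  | zero => intro a; simp [minC]
  | succ r ih =>
    intro a
    show a :: minC (a+1) (r+1) = (a :: minC (a+1) r) ++ [a + (r+1)]
    rw [ih (a+1)]
    have h : a + 1 + (r:Int) = a + (↑r + 1) := by ring
    rw [h]
    simp

lemma minC_getLastD : ∀ (r : Nat) (a : Int), (minC a (r+1)).getLastD 0 = a + r := by
  intro r a
  rw [minC_snoc]
  simp

lemma minC_valid : ∀ (r : Nat) (a hi : Int), 0 ≤ a → a + r ≤ hi → Valid hi (minC a r) := by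
  intro r
  induction r with
  | zero => intro a hi _ _; simp [minC, Valid]
  | succ r ih =>
    intro a hi ha h
    refine ⟨ha, ?_, ?_, ih (a+1) hi (by omega) (by push_cast at h ⊢; omega)⟩
    · rw [minC_length]; push_cast at h ⊢; omega
    · cases r with
      | zero => simp [minC]
      | succ r => simp [minC]

lemma succA_ne_nil {hi : Int} : ∀ {c c' : List Int}, succA hi c = some c' → c' ≠ [] := by
  intro c c' h
  cases c with
  | nil => simp [succA] at h
  | cons x xs =>
    simp only [succA] at h
    cases hx : succA hi xs with
    | some xs' => rw [hx] at h; simp at h; simp [← h]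
    | none =>
      rw [hx] at h
      simp only at h
      split at h
      · simp at h; cases xs <;> simp [minC, ← h]
      · simp at h

lemma succA_length {hi : Int} : ∀ {c c' : List Int}, succA hi c = some c' → c'.length = c.length := by
  intro c
  induction c with
  | nil => intro c' h; simp [succA] at h
  | cons x xs ih =>
    intro c' h
    simp only [succA] at h
    cases hx : succA hi xs with
    | some xs' => rw [hx] at h; simp at h; rw [← h]; simp [ih hx]
    | none =>
      rw [hx] at h
      simp only at h
      split at h
      · simp at h; rw [← h]; simp [minC_length]
      · simp at h

lemma succA_head {hi : Int} : ∀ {x : Int} {xs c' : List Int}, succA hi (x :: xs) = some c' →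
    ∃ y ys, c' = y :: ys ∧ x ≤ y := by
  intro x xs c' h
  simp only [succA] at h
  cases hx : succA hi xs with
  | some xs' => rw [hx] at h; simp at h; exact ⟨x, xs', by simp [← h], le_refl x⟩
  | none =>
    rw [hx] at h
    simp only at h
    split at h
    · simp at h
      refine ⟨x + 1, minC (x+1+1) xs.length, ?_, by omega⟩
      simp [← h, minC]
    · simp at h

lemma succA_snoc (hi : Int) : ∀ (ys : List Int) (z : Int),
    succA hi (ys ++ [z]) =
      if z + 1 < hi then some (ys ++ [z + 1])
      else (succA (hi - 1) ys).map (fun ys' => ys' ++ [ys'.getLastD 0 + 1]) := by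
  intro ys
  induction ys with
  | nil =>
    intro z
    simp only [List.nil_append, succA, List.length_nil]
    norm_num
    split_ifs <;> simp [minC]
  | cons y ys ih =>
    intro z
    show succA hi (y :: (ys ++ [z])) = _
    simp only [succA]
    rw [ih z]
    by_cases hz : z + 1 < hi
    · simp [hz]
    · simp only [hz, if_false]
      cases hs : succA (hi - 1) ys with
      | some ys' =>
        have hne : ys' ≠ [] := succA_ne_nil hs
        cases ys' with
        | nil => exact absurd rfl hne
        | cons a as => simp [List.getLast?_cons_cons]
      | none =>
        have hlen : ((ys ++ [z]).length : Int) = (ys.length : Int) + 1 := by simp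
        by_cases hy : y + (ys.length : Int) + 1 < hi - 1
        · rw [if_pos (show y + ((ys ++ [z]).length : Int) + 1 < hi by rw [hlen]; omega), if_pos hy]
          simp only [Option.map_some]
          rw [minC_getLastD ys.length (y+1)]
          have h2 : (ys ++ [z]).length + 1 = (ys.length + 1) + 1 := by simp
          have e1 : (y+1) + ((ys.length + 1 : Nat) : Int) = y + 1 + (ys.length : Int) + 1 := by
            push_cast; ring
          rw [h2, minC_snoc (ys.length + 1) (y+1), e1]
          simp
        · rw [if_neg (show ¬ (y + ((ys ++ [z]).length : Int) + 1 < hi) by rw [hlen]; omega), if_neg hy]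
          simp

lemma tailC_max : ∀ (c : List Int) (hi : Int), Valid hi c → succA hi c = none → tailC hi c = [c] := by
  intro c
  induction c with
  | nil => intro hi _ _; simp [tailC]
  | cons x xs ih =>
    intro hi hv hs
    obtain ⟨hx0, hxb, hhead, hvx⟩ := hv
    simp only [succA] at hs
    cases hsx : succA hi xs with
    | some xs' => rw [hsx] at hs; simp at hs
    | none =>
      rw [hsx] at hs
      simp only at hs
      split at hs
      · simp at hs
      · rename_i hcond
        simp only [tailC, ih hi hvx hsx, List.map_cons, List.map_nil]
        have hx : x = hi - xs.length - 1 := by omega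
        have hlen : (PySem.List.pyRange (x+1) hi 1).length = xs.length := by
          rw [PySem.List.length_pyRange_one]; omega
        rw [combosRec_short _ _ (by rw [hlen]; omega)]
        simp

lemma tailC_min : ∀ (r : Nat) (a hi : Int), a + r ≤ hi →
    tailC hi (minC a r) = combosRec (PySem.List.pyRange a hi 1) r := by
  intro r
  induction r with
  | zero =>
    intro a hi h
    simp [minC, tailC, combosRec_zero]
  | succ r ih =>
    intro a hi h
    push_cast at h
    show tailC hi (a :: minC (a+1) r) = _
    simp only [tailC, minC_length]
    rw [ih (a+1) hi (by omega)]
    rw [PySem.List.pyRange_one_cons (show a < hi by omega), combosRec_cons]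

lemma tailC_step : ∀ (c : List Int) (hi : Int) (c' : List Int), Valid hi c → succA hi c = some c' →
    tailC hi c = c :: tailC hi c' ∧ Valid hi c' := by
  intro c
  induction c with
  | nil => intro hi c' _ h; simp [succA] at h
  | cons x xs ih =>
    intro hi c' hv hs
    obtain ⟨hx0, hxb, hhead, hvx⟩ := hv
    simp only [succA] at hs
    cases hsx : succA hi xs with
    | some xs' =>
      rw [hsx] at hs; simp at hs
      obtain ⟨ht, hv'⟩ := ih hi xs' hvx hsx
      have hlen := succA_length hsx
      constructor
      · rw [← hs]
        simp only [tailC, ht, List.map_cons, hlen, List.cons_append]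
      · rw [← hs]
        refine ⟨hx0, by rw [hlen]; exact hxb, ?_, hv'⟩
        cases xs with
        | nil => simp [succA] at hsx
        | cons y ys =>
          obtain ⟨y', ys', rfl, hyy⟩ := succA_head hsx
          simp only at hhead ⊢
          omega
    | none =>
      rw [hsx] at hs
      simp only at hs
      split at hs
      · rename_i hcond
        simp only [Option.some.injEq] at hs
        have htm := tailC_max xs hi hvx hsx
        constructor
        · rw [← hs]
          simp only [tailC, htm, List.map_cons, List.map_nil]
          rw [tailC_min (xs.length + 1) (x+1) hi (by push_cast; omega)]
          simp
        · rw [← hs]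
          exact minC_valid (xs.length + 1) (x+1) hi (by omega) (by push_cast; omega)
      · simp at hs

lemma scanA_le : ∀ (f : Nat) (c : List Int) (Nb Nr nb : Int), scanA c Nb Nr nb f ≤ nb := by
  intro f
  induction f with
  | zero => intro c Nb Nr nb; simp [scanA]
  | succ f ih =>
    intro c Nb Nr nb
    simp only [scanA]
    split
    · exact le_trans (ih c Nb Nr (nb-1)) (by omega)
    · exact le_refl nb

lemma getD_last (w : List Int) (h : w ≠ []) : w.getD (w.length - 1) 0 = w.getLastD 0 := by
  have hp : 0 < w.length := List.length_pos_of_ne_nil h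
  rw [List.getD_eq_getElem w 0 (by omega), List.getLastD_eq_getLast?,
      List.getLast?_eq_some_getLast h]
  simp [List.getLast_eq_getElem]

lemma scan_shift (ys : List Int) (z hi : Int) (hys : ys ≠ []) (hz : z = hi - 1) :
    ∀ (f : Nat) (nb : Int), -1 ≤ nb → nb ≤ (ys.length : Int) - 1 →
      (∀ i : Nat, (nb : Int) < i → i < ys.length → ys.getD i 0 = hi - 1 - ((ys.length : Int) - i)) →
      scanA (ys ++ [z]) hi ((ys.length : Int) + 1) nb f = scanA ys (hi - 1) (ys.length : Int) nb f := by
  intro f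
  induction f with
  | zero => intro nb _ _ _; simp [scanA]
  | succ f ih =>
    intro nb h1 h2 hinv
    have hpos : 0 < ys.length := List.length_pos_of_ne_nil hys
    simp only [scanA]
    by_cases h0 : nb = -1
    · subst h0
      have hL : PySem.List.pyGetD (ys ++ [z]) (-1) 0 = z :=
        PySem.List.pyGetD_neg_one_append_singleton ys z 0
      have hR : PySem.List.pyGetD ys (-1) 0 = ys.getD (ys.length - 1) 0 := by
        rw [PySem.List.pyGetD_neg_one ys 0 hys]
        rw [List.getD_eq_getElem ys 0 (by omega), List.getLast_eq_getElem]
      have hRv : ys.getD (ys.length - 1) 0 = hi - 2 := by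
        rw [hinv (ys.length - 1) (by omega) (by omega)]
        push_cast [Nat.cast_sub (by omega : 1 ≤ ys.length)]
        ring
      rw [hL, hR, hRv]
      rw [if_neg (by omega), if_neg (by omega)]
    · have hnb0 : 0 ≤ nb := by omega
      have hlt : nb.toNat < ys.length := by omega
      have hcastnb : (nb.toNat : Int) = nb := Int.toNat_of_nonneg hnb0
      have hL : PySem.List.pyGetD (ys ++ [z]) nb 0 = ys.getD nb.toNat 0 := by
        rw [PySem.List.pyGetD_eq_getElem (ys ++ [z]) 0 hnb0 (by simp; omega)]
        rw [List.getD_eq_getElem ys 0 hlt]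
        exact List.getElem_append_left hlt
      have hR : PySem.List.pyGetD ys nb 0 = ys.getD nb.toNat 0 := by
        rw [PySem.List.pyGetD_eq_getElem ys 0 hnb0 (by omega)]
        rw [List.getD_eq_getElem ys 0 hlt]
      have hceq : hi - ((ys.length : Int) + 1 - nb) = hi - 1 - ((ys.length : Int) - nb) := by ring
      rw [hL, hR, hceq]
      by_cases hc : ys.getD nb.toNat 0 = hi - 1 - ((ys.length : Int) - nb)
      · rw [if_pos hc, if_pos hc]
        apply ih (nb - 1) (by omega) (by omega)
        intro i hi1 hi2
        by_cases hieq : (i : Int) = nb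
        · have hi' : i = nb.toNat := by omega
          rw [hi', hcastnb]
          exact hc
        · exact hinv i (by omega) hi2
      · rw [if_neg hc, if_neg hc]

lemma reset_length : ∀ (ns : List Int) (w : List Int),
    (ns.foldl (fun bs n => PySem.List.pySetD bs n (PySem.List.pyGetD bs (n-1) 0 + 1)) w).length
      = w.length := by
  intro ns
  induction ns with
  | nil => intro w; rfl
  | cons n ns ih =>
    intro w
    simp only [List.foldl_cons]
    rw [ih]
    exact PySem.List.length_pySetD w n _

lemma reset_append : ∀ (ns : List Int) (w : List Int) (z : Int),
    (∀ n ∈ ns, 1 ≤ n ∧ n < (w.length : Int)) →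
    (ns.foldl (fun bs n => PySem.List.pySetD bs n (PySem.List.pyGetD bs (n-1) 0 + 1)) (w ++ [z]))
      = (ns.foldl (fun bs n => PySem.List.pySetD bs n (PySem.List.pyGetD bs (n-1) 0 + 1)) w) ++ [z] := by
  intro ns
  induction ns with
  | nil => intro w z _; rfl
  | cons n ns ih =>
    intro w z hb
    obtain ⟨hn1, hn2⟩ := hb n (List.mem_cons_self)
    simp only [List.foldl_cons]
    have hg : PySem.List.pyGetD (w ++ [z]) (n-1) 0 = PySem.List.pyGetD w (n-1) 0 := by
      rw [PySem.List.pyGetD_eq_getElem (w ++ [z]) 0 (by omega) (by simp; omega)]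
      rw [PySem.List.pyGetD_eq_getElem w 0 (by omega) (by omega)]
      exact List.getElem_append_left (by omega)
    have hs : PySem.List.pySetD (w ++ [z]) n (PySem.List.pyGetD w (n-1) 0 + 1)
        = PySem.List.pySetD w n (PySem.List.pyGetD w (n-1) 0 + 1) ++ [z] := by
      rw [PySem.List.pySetD_of_nonneg (w ++ [z]) _ (by omega), PySem.List.pySetD_of_nonneg w _ (by omega)]
      rw [List.set_append]
      rw [if_pos (by omega)]
    rw [hg, hs]
    apply ih
    intro m hm
    obtain ⟨hm1, hm2⟩ := hb m (List.mem_cons_of_mem n hm)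
    rw [PySem.List.length_pySetD]
    exact ⟨hm1, hm2⟩

lemma valid_snoc : ∀ (ys : List Int) (z hi : Int), Valid hi (ys ++ [z]) →
    Valid (hi-1) ys ∧ 0 ≤ z ∧ z + 1 ≤ hi := by
  intro ys
  induction ys with
  | nil =>
    intro z hi hv
    obtain ⟨h1, h2, _, _⟩ := hv
    exact ⟨trivial, h1, by simpa using h2⟩
  | cons y ys ih =>
    intro z hi hv
    obtain ⟨h1, h2, h3, h4⟩ := hv
    obtain ⟨hv', hz0, hz1⟩ := ih z hi h4
    refine ⟨⟨h1, by simp at h2 ⊢; omega, ?_, hv'⟩, hz0, hz1⟩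
    cases ys with
    | nil => trivial
    | cons w ws => simpa using h3

lemma scanA_succ (c : List Int) (Nb Nr nb : Int) (f : Nat) :
    scanA c Nb Nr nb (f+1)
      = if PySem.List.pyGetD c nb 0 = Nb - (Nr - nb) then scanA c Nb Nr (nb-1) f else nb := rfl

lemma bridge : ∀ (c : List Int) (hi : Int), c ≠ [] → Valid hi c →
    bodyA hi (c.length : Int) c = succA hi c := by
  intro c
  induction c using List.reverseRecOn with
  | nil => intro hi hne _; exact absurd rfl hne
  | append_singleton ys z ih =>
    intro hi _ hv
    obtain ⟨hvy, hz0, hz1⟩ := valid_snoc ys z hi hv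
    have hNr : ((ys ++ [z]).length : Int) = (ys.length : Int) + 1 := by simp
    have htn : ((ys.length : Int) + 1).toNat = ys.length + 1 := by omega
    rw [succA_snoc hi ys z]
    by_cases hzmax : z + 1 < hi
    · -- last element below its maximum: scan stops immediately
      rw [if_pos hzmax]
      simp only [bodyA, hNr, htn]
      have e1 : (ys.length : Int) + 1 - 1 = ((ys.length : Nat) : Int) := by ring
      have hget : PySem.List.pyGetD (ys ++ [z]) ((ys.length : Nat) : Int) 0 = z := by
        rw [PySem.List.pyGetD_natCast]
        simp
      have hscan : scanA (ys ++ [z]) hi ((ys.length : Int) + 1) ((ys.length : Int) + 1 - 1)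
          (ys.length + 1 + 2) = (ys.length : Int) := by
        rw [e1]
        rw [show ys.length + 1 + 2 = (ys.length + 2) + 1 from rfl, scanA_succ, hget]
        rw [if_neg (by omega)]
      rw [hscan]
      rw [if_neg (by omega)]
      have hset : PySem.List.pySetD (ys ++ [z]) ((ys.length : Nat) : Int)
          (PySem.List.pyGetD (ys ++ [z]) ((ys.length : Nat) : Int) 0 + 1) = ys ++ [z + 1] := by
        rw [hget, PySem.List.pySetD_natCast, List.set_append]
        simp
      rw [show ((ys.length : Int)) = ((ys.length : Nat) : Int) from rfl, hset]
      rw [if_neg (by omega)]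
    · -- last element at its maximum: z = hi - 1
      rw [if_neg hzmax]
      have hzeq : z = hi - 1 := by omega
      by_cases hys : ys = []
      · -- singleton [z], all max: the scan walks to -1 (Python's bunnies[-1] wraps) and breaks
        subst hys
        simp only [succA, Option.map_none]
        show bodyA hi ((1:Nat) : Int) [z] = none
        have g0 : PySem.List.pyGetD [z] (0:Int) 0 = z := by
          simp [PySem.List.pyGetD_zero_cons]
        have gm1 : PySem.List.pyGetD [z] ((0:Int)-1) 0 = z := by
          norm_num
          rw [PySem.List.pyGetD_neg_one [z] 0 (by simp)]
          simp
        have hs : scanA [z] hi ((1:Nat):Int) (((1:Nat):Int) - 1) ((((1:Nat):Int)).toNat + 2) = -1 := by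
          rw [show (((1:Nat):Int)) - 1 = (0:Int) by norm_num,
              show ((((1:Nat):Int)).toNat + 2) = 3 by norm_num]
          rw [show (3:Nat) = 2 + 1 from rfl, scanA_succ, g0, if_pos (by omega)]
          rw [show (2:Nat) = 1 + 1 from rfl, scanA_succ, gm1, if_neg (by omega)]
          norm_num
        simp only [bodyA, hs]
        norm_num
      · -- ys ≠ []: the scan skips z and is the scan of ys with bound hi-1
        have hpos : 0 < ys.length := List.length_pos_of_ne_nil hys
        have ihy := ih (hi - 1) hys hvy
        simp only [bodyA, hNr, htn] at ihy ⊢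
        rw [Int.toNat_natCast] at ihy
        set r := scanA ys (hi - 1) (ys.length : Int) ((ys.length : Int) - 1) (ys.length + 2) with hr
        have e1 : (ys.length : Int) + 1 - 1 = ((ys.length : Nat) : Int) := by ring
        have hget : PySem.List.pyGetD (ys ++ [z]) ((ys.length : Nat) : Int) 0 = z := by
          rw [PySem.List.pyGetD_natCast]
          simp
        have hscan : scanA (ys ++ [z]) hi ((ys.length : Int) + 1) ((ys.length : Int) + 1 - 1)
            (ys.length + 1 + 2) = r := by
          rw [e1]
          rw [show ys.length + 1 + 2 = (ys.length + 2) + 1 from rfl, scanA_succ, hget]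
          rw [if_pos (by omega)]
          have e2 : ((ys.length : Nat) : Int) - 1 = (ys.length : Int) - 1 := by ring
          rw [e2]
          exact scan_shift ys z hi hys hzeq (ys.length + 2) ((ys.length : Int) - 1)
            (by omega) (by omega) (by intro i h1 h2; omega)
        rw [hscan]
        by_cases hrneg : r < 0
        · rw [if_pos hrneg]
          rw [if_pos hrneg] at ihy
          rw [← ihy]
          simp
        · rw [if_neg hrneg]
          rw [if_neg hrneg] at ihy
          rw [← ihy]
          have hrle : r ≤ (ys.length : Int) - 1 := by
            have h := scanA_le (ys.length + 2) ys (hi-1) (ys.length : Int) ((ys.length : Int) - 1)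
            rw [← hr] at h
            exact h
          have hr0 : 0 ≤ r := by omega
          have hrlt : r.toNat < ys.length := by omega
          have hgetr : PySem.List.pyGetD (ys ++ [z]) r 0 = PySem.List.pyGetD ys r 0 := by
            rw [PySem.List.pyGetD_eq_getElem (ys ++ [z]) 0 hr0 (by simp; omega),
                PySem.List.pyGetD_eq_getElem ys 0 hr0 (by omega)]
            exact List.getElem_append_left hrlt
          have hsetr : ∀ v : Int,
              PySem.List.pySetD (ys ++ [z]) r v = PySem.List.pySetD ys r v ++ [z] := by
            intro v
            rw [PySem.List.pySetD_of_nonneg (ys ++ [z]) v hr0, PySem.List.pySetD_of_nonneg ys v hr0,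
                List.set_append, if_pos hrlt]
          rw [hgetr, hsetr]
          rw [if_pos (by omega)]
          set ys' := PySem.List.pySetD ys r (PySem.List.pyGetD ys r 0 + 1) with hys'
          have hlys' : ys'.length = ys.length := PySem.List.length_pySetD ys r _
          have hsplit : PySem.List.pyRange (r+1) ((ys.length : Int) + 1) 1
              = PySem.List.pyRange (r+1) (ys.length : Int) 1 ++ [(ys.length : Int)] :=
            PySem.List.pyRange_one_succ_right (by omega)
          rw [hsplit, List.foldl_append]
          have hresapp := reset_append (PySem.List.pyRange (r+1) (ys.length : Int) 1) ys' z
            (by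
              intro n hn
              rw [PySem.List.mem_pyRange_one] at hn
              exact ⟨by omega, by rw [hlys']; omega⟩)
          rw [hresapp]
          set w1 := (PySem.List.pyRange (r+1) (ys.length : Int) 1).foldl
            (fun bs n => PySem.List.pySetD bs n (PySem.List.pyGetD bs (n-1) 0 + 1)) ys' with hw1
          have hlw1 : w1.length = ys.length := by
            rw [hw1, reset_length, hlys']
          have hw1ne : w1 ≠ [] := by
            intro h; rw [h] at hlw1; simp at hlw1; omega
          have hgetl : PySem.List.pyGetD (w1 ++ [z]) ((ys.length : Int) - 1) 0 = w1.getLastD 0 := by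
            rw [PySem.List.pyGetD_eq_getElem (w1 ++ [z]) 0 (by omega) (by simp [hlw1])]
            have hidx : ((ys.length : Int) - 1).toNat < w1.length := by omega
            rw [List.getElem_append_left hidx]
            rw [← List.getD_eq_getElem w1 0 hidx,
                show ((ys.length : Int) - 1).toNat = w1.length - 1 by omega,
                getD_last w1 hw1ne]
          have hsetl : PySem.List.pySetD (w1 ++ [z]) (ys.length : Int) (w1.getLastD 0 + 1)
              = w1 ++ [w1.getLastD 0 + 1] := by
            rw [PySem.List.pySetD_of_nonneg (w1 ++ [z]) _ (by omega), List.set_append]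
            rw [if_neg (by rw [hlw1]; omega)]
            rw [show ((ys.length : Int)).toNat - w1.length = 0 by rw [hlw1]; omega]
            simp
          simp only [List.foldl_cons, List.foldl_nil]
          rw [hgetl, hsetl]
          have hival : (if r < (ys.length : Int) - 1
              then (PySem.List.pyRange (r+1) (ys.length : Int) 1).foldl
                (fun bs n => PySem.List.pySetD bs n (PySem.List.pyGetD bs (n-1) 0 + 1)) ys'
              else ys') = w1 := by
            by_cases hc : r < (ys.length : Int) - 1
            · rw [if_pos hc, hw1]
            · rw [if_neg hc, hw1]
              rw [show r + 1 = (ys.length : Int) by omega,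
                  PySem.List.pyRange_one_eq_nil (by omega)]
              rfl
          rw [hival]
          simp

lemma loopA_eq : ∀ (f : Nat) (c : List Int) (hi : Int) (acc : List (List Int)), c ≠ [] →
    Valid hi c → (tailC hi c).length ≤ f →
    loopA hi (c.length : Int) f c acc = acc ++ tailC hi c := by
  intro f
  induction f with
  | zero =>
    intro c hi acc hne hv hle
    exfalso
    cases hs : succA hi c with
    | none => rw [tailC_max c hi hv hs] at hle; simp at hle
    | some c' =>
      obtain ⟨ht, _⟩ := tailC_step c hi c' hv hs
      rw [ht] at hle
      simp at hle
  | succ f ih =>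
    intro c hi acc hne hv hle
    simp only [loopA]
    rw [bridge c hi hne hv]
    cases hs : succA hi c with
    | none =>
      rw [tailC_max c hi hv hs]
    | some c' =>
      obtain ⟨ht, hv'⟩ := tailC_step c hi c' hv hs
      have hlen := succA_length hs
      have hne' := succA_ne_nil hs
      simp only []
      rw [show ((c.length : Nat) : Int) = ((c'.length : Nat) : Int) by rw [hlen]]
      rw [ih c' hi (acc ++ [c]) hne' hv' (by rw [ht] at hle; simp at hle; omega)]
      rw [ht]
      simp

lemma getCombos_eq (Nb Nr : Int) (h2 : 2 ≤ Nr) (hlt : Nr + 1 ≤ Nb) :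
    getCombos Nb Nr = combosRec (PySem.List.pyRange 0 Nb 1) Nr.toNat := by
  unfold getCombos
  have hcast : ((Nr.toNat : Nat) : Int) = Nr := Int.toNat_of_nonneg (by omega)
  have hmin : PySem.List.pyRange 0 Nr 1 = minC 0 Nr.toNat := by
    rw [minC_eq_pyRange]
    rw [show (0:Int) + (Nr.toNat : Int) = Nr by omega]
  have hne : minC 0 Nr.toNat ≠ [] := by
    intro h
    have := minC_length 0 Nr.toNat
    rw [h] at this
    simp at this
    omega
  have hv : Valid Nb (minC 0 Nr.toNat) := minC_valid Nr.toNat 0 Nb le_rfl (by omega)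
  have htail : tailC Nb (minC 0 Nr.toNat) = combosRec (PySem.List.pyRange 0 Nb 1) Nr.toNat :=
    tailC_min Nr.toNat 0 Nb (by omega)
  have hfuel : (tailC Nb (minC 0 Nr.toNat)).length ≤ (Nb.toNat + 1) ^ Nr.toNat + 1 := by
    rw [htail]
    have h := combosRec_len_le (PySem.List.pyRange 0 Nb 1) Nr.toNat
    rw [PySem.List.length_pyRange_one] at h
    rw [show ((Nb : Int) - 0).toNat = Nb.toNat by omega] at h
    omega
  have hmain := loopA_eq ((Nb.toNat + 1) ^ Nr.toNat + 1) (minC 0 Nr.toNat) Nb [] hne hv hfuel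
  rw [minC_length, hcast] at hmain
  rw [hmin]
  rw [hmain, htail]
  simp

lemma map_getD_range (xs : List (List Int)) :
    (List.range xs.length).map (fun j => xs.getD j []) = xs := by
  apply List.ext_getElem
  · simp
  · intro i h1 h2
    simp [List.getD, List.getElem?_eq_getElem h2]

lemma gatherF_eq_filter : ∀ (combos : List (List Int)) (k b : Int),
    ((PySem.List.enumerate combos k).filter (fun ic => decide (b ∈ ic.2))).map (·.1)
      = gatherF combos k b := by
  intro combos
  induction combos with
  | nil => intro k b; simp [PySem.List.enumerate_nil, gatherF]
  | cons c cs ih =>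
    intro k b
    rw [PySem.List.enumerate_cons]
    simp only [List.filter_cons]
    by_cases hb : b ∈ c <;> simp [gatherF, hb, ih (k+1) b]

lemma scatter_one : ∀ (c : List Int) (keys0 : List (List Int)) (k : Int), c.Nodup →
    (∀ b ∈ c, 0 ≤ b ∧ b < (keys0.length : Int)) →
    c.foldl (fun ks bunny => PySem.List.pySetD ks bunny (PySem.List.pyGetD ks bunny [] ++ [k])) keys0
      = (List.range keys0.length).map
          (fun j => keys0.getD j [] ++ if ((j : Int) ∈ c) then [k] else []) := by
  intro c
  induction c with
  | nil =>
    intro keys0 k _ _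
    simp only [List.foldl_nil, List.not_mem_nil, if_false, List.append_nil]
    exact (map_getD_range keys0).symm
  | cons b c ih =>
    intro keys0 k hnd hb
    obtain ⟨hb0, hblt⟩ := hb b List.mem_cons_self
    have hbtlt : b.toNat < keys0.length := by omega
    rw [List.nodup_cons] at hnd
    simp only [List.foldl_cons]
    have hstep : PySem.List.pySetD keys0 b (PySem.List.pyGetD keys0 b [] ++ [k])
        = keys0.set b.toNat (keys0[b.toNat] ++ [k]) := by
      rw [PySem.List.pySetD_of_nonneg keys0 _ hb0,
          PySem.List.pyGetD_eq_getElem keys0 [] hb0 (by omega)]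
    rw [hstep]
    rw [ih (keys0.set b.toNat (keys0[b.toNat] ++ [k])) k hnd.2
      (by
        intro x hx
        obtain ⟨h1, h2⟩ := hb x (List.mem_cons_of_mem b hx)
        rw [List.length_set]
        exact ⟨h1, h2⟩)]
    apply List.ext_getElem
    · simp
    · intro i hi1 hi2
      simp only [List.getElem_map, List.getElem_range, List.length_set] at *
      have hilen : i < keys0.length := by simpa using hi1
      rw [List.getD_eq_getElem _ [] (by simpa using hilen),
          List.getD_eq_getElem keys0 [] hilen]
      rw [List.getElem_set]
      by_cases hieq : i = b.toNat
      · subst hieq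
        rw [if_pos rfl]
        have hcast : ((b.toNat : Nat) : Int) = b := by omega
        rw [if_neg (by rw [hcast]; exact hnd.1), if_pos (by rw [hcast]; exact List.mem_cons_self)]
        simp
      · rw [if_neg (by omega)]
        have hcast : ((i : Nat) : Int) ≠ b := by omega
        by_cases hic : ((i : Nat) : Int) ∈ c
        · rw [if_pos hic, if_pos (List.mem_cons_of_mem b hic)]
        · rw [if_neg hic, if_neg (by simp [hcast, hic])]

lemma scatter_all : ∀ (combos : List (List Int)) (k : Int) (keys0 : List (List Int)),
    (∀ c ∈ combos, c.Nodup ∧ ∀ b ∈ c, 0 ≤ b ∧ b < (keys0.length : Int)) →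
    (combos.foldl
      (fun (st : List (List Int) × Int) combo =>
        (combo.foldl
          (fun ks bunny => PySem.List.pySetD ks bunny (PySem.List.pyGetD ks bunny [] ++ [st.2])) st.1,
         st.2 + 1))
      (keys0, k)).1
      = (List.range keys0.length).map (fun j => keys0.getD j [] ++ gatherF combos k (j : Int)) := by
  intro combos
  induction combos with
  | nil =>
    intro k keys0 _
    simp only [List.foldl_nil, gatherF, List.append_nil]
    exact (map_getD_range keys0).symm
  | cons c cs ih =>
    intro k keys0 hb
    obtain ⟨hnd, hbc⟩ := hb c List.mem_cons_self
    simp only [List.foldl_cons]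
    rw [scatter_one c keys0 k hnd hbc]
    rw [ih (k+1) _
      (by
        intro d hd
        obtain ⟨h1, h2⟩ := hb d (List.mem_cons_of_mem c hd)
        refine ⟨h1, ?_⟩
        intro x hx
        obtain ⟨g1, g2⟩ := h2 x hx
        simpa using ⟨g1, g2⟩)]
    apply List.ext_getElem
    · simp
    · intro i hi1 hi2
      have hilen : i < keys0.length := by simpa using hi2
      simp only [List.getElem_map, List.getElem_range]
      rw [List.getD_eq_getElem _ [] (by simpa using hilen)]
      simp only [List.getElem_map, List.getElem_range]
      rw [List.getD_eq_getElem keys0 [] hilen]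
      simp [gatherF]

lemma getKeys_eq (combos : List (List Int)) (Nb : Int)
    (hc : ∀ c ∈ combos, c.Nodup ∧ ∀ b ∈ c, 0 ≤ b ∧ b < Nb) :
    getKeys combos Nb
      = (PySem.List.pyRange 0 Nb 1).map (fun b =>
          ((PySem.List.enumerate combos 0).filter (fun ic => decide (b ∈ ic.2))).map (·.1)) := by
  unfold getKeys
  have hlen : ((PySem.List.pyRange 0 Nb 1).map (fun _ => ([] : List Int))).length = Nb.toNat := by
    simp [PySem.List.length_pyRange_one]
  have hemp : ∀ j : Nat,
      ((PySem.List.pyRange 0 Nb 1).map (fun _ => ([] : List Int))).getD j [] = [] := by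
    intro j
    rw [List.getD]
    cases h : ((PySem.List.pyRange 0 Nb 1).map (fun _ => ([] : List Int)))[j]? with
    | none => simp
    | some v =>
      have := List.getElem?_map (f := fun _ => ([] : List Int)) (l := PySem.List.pyRange 0 Nb 1) (i := j)
      rw [this] at h
      cases h2 : (PySem.List.pyRange 0 Nb 1)[j]? with
      | none => rw [h2] at h; simp at h
      | some w => rw [h2] at h; simp at h; simp [← h]
  rw [scatter_all combos 0 _
    (by
      intro c hcc
      obtain ⟨h1, h2⟩ := hc c hcc
      refine ⟨h1, ?_⟩
      intro b hbb
      obtain ⟨g1, g2⟩ := h2 b hbb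
      rw [hlen]
      exact ⟨g1, by omega⟩)]
  apply List.ext_getElem
  · simp [PySem.List.length_pyRange_one]
  · intro i hi1 hi2
    simp only [List.getElem_map, List.getElem_range, PySem.List.getElem_pyRange_one]
    rw [hemp i, gatherF_eq_filter combos 0 (0 + (i : Int))]
    simp

lemma gatherF_singletons : ∀ (r : Nat) (a k b : Int),
    gatherF ((PySem.List.pyRange a (a + r) 1).map (fun x => [x])) k b
      = if a ≤ b ∧ b < a + r then [k + (b - a)] else [] := by
  intro r
  induction r with
  | zero =>
    intro a k b
    rw [show (a + ((0:Nat):Int)) = a by simp, PySem.List.pyRange_one_eq_nil le_rfl]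
    simp only [List.map_nil, gatherF]
    rw [if_neg (by omega)]
  | succ r ih =>
    intro a k b
    have e : a + ((r+1 : Nat) : Int) = (a+1) + (r : Int) := by push_cast; ring
    rw [e, PySem.List.pyRange_one_cons (by omega)]
    simp only [List.map_cons, gatherF]
    rw [show ((a:Int) + 1 + (r:Int)) = (a+1) + ((r:Nat):Int) from rfl]
    rw [ih (a+1) (k+1) b]
    by_cases hba : b = a
    · subst hba
      rw [if_pos (List.mem_singleton.mpr rfl), if_neg (by omega), if_pos (by constructor <;> omega)]
      simp
    · rw [if_neg (by simp [hba])]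
      by_cases h2 : a + 1 ≤ b ∧ b < a + 1 + (r : Int)
      · rw [if_pos h2, if_pos (by constructor <;> omega)]
        simp only [List.nil_append, List.cons.injEq, and_true]
        omega
      · rw [if_neg h2, if_neg (by omega)]
        simp

-- ===== VERDICT (by name: the statement is the Claim_ definition above) =====
theorem solution_spec : Claim_equal_solution := by
  intro nb nr hdom hpre
  show solution nb nr = solution_alt nb nr
  by_cases h1 : nr < 1
  · simp only [solution, solution_alt]
    rw [if_pos h1, if_pos h1]
  · have hg0 : ¬ (nb - nr + 1 < 0) := by
      rcases hpre with h | h | h <;> omega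
    by_cases h2 : nr = 1
    · have hnb0 : 0 ≤ nb := by rcases hpre with h | h | h <;> omega
      simp only [solution, solution_alt]
      rw [if_neg h1, if_pos h2, if_neg h1, if_neg hg0]
      subst h2
      rw [show nb - 1 + 1 = nb by ring]
      have hlen : (PySem.List.pyRange 0 nb 1).length = nb.toNat := by
        rw [PySem.List.length_pyRange_one]
        omega
      have hcombos : combosRec (PySem.List.pyRange 0 nb 1) nb.toNat
          = [PySem.List.pyRange 0 nb 1] := by
        rw [← hlen, combosRec_full]
      rw [hcombos]
      simp only [Prod.mk.injEq]
      refine ⟨?_, by trivial⟩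
      apply List.map_congr_left
      intro b hbmem
      rw [gatherF_eq_filter [PySem.List.pyRange 0 nb 1] 0 b]
      simp [gatherF, hbmem]
    · by_cases h3 : nr = nb
      · subst h3
        simp only [solution, solution_alt]
        rw [if_neg h1, if_neg h2, if_pos trivial, if_neg h1, if_neg hg0]
        rw [show nr - nr + 1 = (1:Int) by ring, show (1:Int).toNat = 1 from rfl, combosRec_one]
        simp only [Prod.mk.injEq]
        refine ⟨?_, by trivial⟩
        apply List.map_congr_left
        intro b hbmem
        rw [PySem.List.mem_pyRange_one] at hbmem
        rw [gatherF_eq_filter]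
        have hgs := gatherF_singletons nr.toNat 0 0 b
        rw [show (0:Int) + (nr.toNat : Int) = nr by omega] at hgs
        rw [hgs, if_pos (by exact ⟨hbmem.1, hbmem.2⟩)]
        simp
      · have hnr2 : 2 ≤ nr := by omega
        have hlt : nr < nb := by rcases hpre with h | h | h <;> omega
        simp only [solution, solution_alt]
        rw [if_neg h1, if_neg h2, if_neg h3, if_neg h1, if_neg hg0]
        have hNR2 : 2 ≤ nb - nr + 1 := by omega
        have hNRlt : (nb - nr + 1) + 1 ≤ nb := by omega
        rw [getCombos_eq nb (nb - nr + 1) hNR2 hNRlt]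
        rw [getKeys_eq _ nb (by
          intro c hcc
          have hsub := combosRec_sublist (PySem.List.pyRange 0 nb 1) (nb - nr + 1).toNat c hcc
          refine ⟨(PySem.List.nodup_pyRange_one 0 nb).sublist hsub, ?_⟩
          intro b hbb
          have hmem : b ∈ PySem.List.pyRange 0 nb 1 := hsub.subset hbb
          rw [PySem.List.mem_pyRange_one] at hmem
          exact hmem)]
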